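-- pv_equiv track=rewrite | github.com/iswanulumam/cp-alta | 5-array/7-mengelompokan-angka/solution.py | mengelompokkanAngka
-- ===== SOURCE A (Python) =====
-- def mengelompokkanAngka(arr):
--   result = [[], [], []]
--   for a in arr:
--     if a % 3 == 0:
--       result[2].append(a)
--     elif a % 2 != 0:
--       result[1].append(a)
--     else:
--       result[0].append(a)
--   return result
-- ===== SOURCE B (Python) =====
-- def mengelompokkanAngka(arr):
--   return [
--     [a for a in arr if a % 3 != 0 and a % 2 == 0],
--     [a for a in arr if a % 3 != 0 and a % 2 != 0],
--     [a for a in arr if a % 3 == 0],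
--   ]
-- ===== Notes on version B (the rewrite author's own statement) =====
-- stated objective: idiomatic
-- what changed: Replaced the single branched accumulating loop with three independent filtering comprehensions returned directly as the result.
import Mathlib
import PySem

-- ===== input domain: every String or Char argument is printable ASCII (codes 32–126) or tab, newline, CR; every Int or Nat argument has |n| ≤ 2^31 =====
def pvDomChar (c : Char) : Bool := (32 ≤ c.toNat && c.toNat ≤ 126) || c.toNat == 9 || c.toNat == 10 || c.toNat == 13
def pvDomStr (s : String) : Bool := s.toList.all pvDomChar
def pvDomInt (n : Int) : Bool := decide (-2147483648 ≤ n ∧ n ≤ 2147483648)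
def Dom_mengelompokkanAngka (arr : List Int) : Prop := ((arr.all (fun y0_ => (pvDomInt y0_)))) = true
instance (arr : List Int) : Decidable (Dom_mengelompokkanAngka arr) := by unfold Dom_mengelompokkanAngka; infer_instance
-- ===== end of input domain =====

-- B replaces the single branched accumulating loop with three independent filtering scans (idiomatic decomposition).


-- ===== PORT A =====
-- literal port: fold over arr, appending to one of three accumulated buckets
def mengelompokkanAngka (arr : List Int) : List (List Int) :=
  let result :=
    arr.foldl (fun (r : List Int × List Int × List Int) a =>
      if PySem.Int.mod a 3 = 0 then (r.1, r.2.1, r.2.2 ++ [a])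
      else if PySem.Int.mod a 2 ≠ 0 then (r.1, r.2.1 ++ [a], r.2.2)
      else (r.1 ++ [a], r.2.1, r.2.2)) ([], [], [])
  [result.1, result.2.1, result.2.2]

-- ===== PORT B =====
-- three independent filtering scans
def mengelompokkanAngka_alt (arr : List Int) : List (List Int) :=
  [ arr.filter (fun a => PySem.Int.mod a 3 ≠ 0 ∧ PySem.Int.mod a 2 = 0),
    arr.filter (fun a => PySem.Int.mod a 3 ≠ 0 ∧ PySem.Int.mod a 2 ≠ 0),
    arr.filter (fun a => PySem.Int.mod a 3 = 0) ]

-- ===== PRECONDITION & SPEC =====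
def Spec_mengelompokkanAngka (arr : List Int) (out : List (List Int)) : Prop := out = mengelompokkanAngka_alt arr
instance (arr : List Int) (out : List (List Int)) : Decidable (Spec_mengelompokkanAngka arr out) := by unfold Spec_mengelompokkanAngka; infer_instance

-- ===== CLAIM (what is proved, stated in full; the proofs are below) =====
def Claim_equal_mengelompokkanAngka : Prop := ∀ (arr : List Int), Dom_mengelompokkanAngka arr → Spec_mengelompokkanAngka arr (mengelompokkanAngka arr)

-- ===== LEMMAS AND PROOFS =====

lemma mengelompokkanAngka_fold_inv (arr : List Int) (r0 r1 r2 : List Int) :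
    arr.foldl (fun (r : List Int × List Int × List Int) a =>
      if PySem.Int.mod a 3 = 0 then (r.1, r.2.1, r.2.2 ++ [a])
      else if PySem.Int.mod a 2 ≠ 0 then (r.1, r.2.1 ++ [a], r.2.2)
      else (r.1 ++ [a], r.2.1, r.2.2)) (r0, r1, r2)
    = (r0 ++ arr.filter (fun a => PySem.Int.mod a 3 ≠ 0 ∧ PySem.Int.mod a 2 = 0),
       r1 ++ arr.filter (fun a => PySem.Int.mod a 3 ≠ 0 ∧ PySem.Int.mod a 2 ≠ 0),
       r2 ++ arr.filter (fun a => PySem.Int.mod a 3 = 0)) := by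
  induction arr generalizing r0 r1 r2 with
  | nil => simp
  | cons a t ih =>
    simp only [List.foldl_cons]
    by_cases h3 : PySem.Int.mod a 3 = 0
    · rw [if_pos h3, ih]
      simp at h3
      simp [h3]
    · by_cases h2 : PySem.Int.mod a 2 = 0
      · rw [if_neg h3, if_neg (by simpa using h2), ih]
        simp at h3 h2
        simp [h3, h2]
      · rw [if_neg h3, if_pos h2, ih]
        simp at h3 h2
        simp [h3, h2]

-- ===== VERDICT (by name: the statement is the Claim_ definition above) =====
theorem mengelompokkanAngka_spec : Claim_equal_mengelompokkanAngka := by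
  intro arr _
  unfold Spec_mengelompokkanAngka mengelompokkanAngka mengelompokkanAngka_alt
  rw [mengelompokkanAngka_fold_inv]
  simp
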